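-- pv_equiv track=rewrite | github.com/mr-cyberdron/Late_potentials_research | Create simple late potentials database/Calculate_datasets.py | saecg_filter
-- ===== SOURCE A (Python) =====
-- def saecg_filter(saecg):
--     if not list(saecg):
--         return None
--     else:
--         filtered_saecg = []
--         saecg_lens_mas = []
--         for saecg_item in saecg:
--             if saecg_item == [0, 0, 0]:
--                 pass
--             else:
--                 filtered_saecg.append(saecg_item)
--                 saecg_lens_mas.append(len(saecg_item))
--         from statistics import mode
--         if not list(filtered_saecg):
--             return None
--         mode_saecg_len = mode(saecg_lens_mas)
--         filtered2_saecg = []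
--         for saecg_filt_item in filtered_saecg:
--             if len(saecg_filt_item) != mode_saecg_len:
--                 pass
--             else:
--                 filtered2_saecg.append(saecg_filt_item)
--         if not list(filtered2_saecg):
--             return None
--         return filtered2_saecg
-- ===== SOURCE B (Python) =====
-- def saecg_filter(saecg):
--     if not list(saecg):
--         return None
--     buckets = {}
--     for item in saecg:
--         if item != [0, 0, 0]:
--             buckets.setdefault(len(item), []).append(item)
--     if not buckets:
--         return None
--     best_len = max(buckets, key=lambda k: len(buckets[k]))
--     return buckets[best_len]
-- ===== Notes on version B (the rewrite author's own statement) =====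
-- stated objective: faster
-- what changed: One grouping pass into a length-keyed dict of buckets replaces A's filter pass plus statistics.mode (Counter build + max scan) plus a second filtering scan; the answer is the largest bucket (first-inserted on ties, matching mode's tie-break).
import Mathlib
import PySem

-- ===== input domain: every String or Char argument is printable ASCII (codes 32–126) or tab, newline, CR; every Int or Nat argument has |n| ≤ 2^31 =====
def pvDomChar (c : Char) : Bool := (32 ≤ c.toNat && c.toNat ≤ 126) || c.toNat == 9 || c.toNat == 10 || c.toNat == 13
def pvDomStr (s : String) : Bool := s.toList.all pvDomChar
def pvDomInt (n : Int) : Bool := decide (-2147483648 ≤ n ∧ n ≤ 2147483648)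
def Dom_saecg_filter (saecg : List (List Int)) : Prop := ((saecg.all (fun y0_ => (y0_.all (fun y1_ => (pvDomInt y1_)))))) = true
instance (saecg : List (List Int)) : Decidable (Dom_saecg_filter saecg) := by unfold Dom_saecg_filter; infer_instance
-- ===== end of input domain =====

-- B replaces A's filter pass + statistics.mode (Counter + max scan) + second filtering scan by one
-- grouping pass into a length-keyed dict of buckets and returning the largest bucket (first on ties).


-- ===== PORT A =====
-- statistics.mode(data) (CPython ≥ 3.8): Counter(data).most_common(1)[0][0]; most_common(1)
-- is heapq.nlargest(1, items, key=count) = the FIRST item with maximal count, i.e. max?.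
-- Returns none exactly where Python raises StatisticsError (empty data).
def pyMode (xs : List Int) : Option Int :=
  (PySem.List.max? (PySem.Dict.counter xs).items (fun p => p.2)).map (fun p => p.1)

def saecg_filter (saecg : List (List Int)) : Option (List (List Int)) :=
  if saecg.isEmpty then none
  else
    -- one loop, two accumulators (filtered_saecg, saecg_lens_mas)
    let fl := saecg.foldl
      (fun (p : List (List Int) × List Int) saecg_item =>
        if saecg_item == [0, 0, 0] then p
        else (p.1 ++ [saecg_item], p.2 ++ [(saecg_item.length : Int)]))
      ([], [])
    if fl.1.isEmpty then none
    else
      match pyMode fl.2 with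
      | none => none  -- unreachable: fl.2 is nonempty exactly when fl.1 is
      | some mode_saecg_len =>
        let filtered2 := fl.1.foldl
          (fun acc saecg_filt_item =>
            if (saecg_filt_item.length : Int) != mode_saecg_len then acc
            else acc ++ [saecg_filt_item]) []
        if filtered2.isEmpty then none else some filtered2

-- ===== PORT B =====
def saecg_filter_alt (saecg : List (List Int)) : Option (List (List Int)) :=
  if saecg.isEmpty then none
  else
    let buckets := saecg.foldl
      (fun (d : PySem.Dict Int (List (List Int))) item =>
        if item != [0, 0, 0] then d.modify (item.length : Int) [] (fun b => b ++ [item]) else d)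
      PySem.Dict.empty
    if buckets.keys.isEmpty then none
    else
      let best_len := PySem.List.maxD buckets.keys (fun k => (buckets.getD k []).length) 0
      some (buckets.getD best_len [])

-- ===== PRECONDITION & SPEC =====
def Spec_saecg_filter (saecg : List (List Int)) (out : Option (List (List Int))) : Prop := out = saecg_filter_alt saecg
instance (saecg : List (List Int)) (out : Option (List (List Int))) : Decidable (Spec_saecg_filter saecg out) := by unfold Spec_saecg_filter; infer_instance

-- ===== CLAIM (what is proved, stated in full; the proofs are below) =====
def Claim_equal_saecg_filter : Prop := ∀ (saecg : List (List Int)), Dom_saecg_filter saecg → Spec_saecg_filter saecg (saecg_filter saecg)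

-- ===== LEMMAS AND PROOFS =====

theorem max?_map {α β κ : Type} [LT κ] [DecidableLT κ] (l : List α) (f : α → β) (key : β → κ) :
    PySem.List.max? (l.map f) key = (PySem.List.max? l (fun x => key (f x))).map f := by
  have H : ∀ (l : List α) (acc : Option α),
      List.foldl (fun acc x => match acc with
        | none => some x
        | some m => if key m < key x then some x else some m) (acc.map f) (l.map f)
      = (List.foldl (fun acc x => match acc with
        | none => some x
        | some m => if key (f m) < key (f x) then some x else some m) acc l).map f := by
    intro l
    induction l with
    | nil => intro acc; rfl
    | cons x t ih =>
      intro acc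
      simp only [List.map_cons, List.foldl_cons]
      have hstep : (match acc.map f with
          | none => some (f x)
          | some m => if key m < key (f x) then some (f x) else some m)
          = (match acc with
          | none => some x
          | some m => if key (f m) < key (f x) then some x else some m).map f := by
        cases acc with
        | none => rfl
        | some m => simp only [Option.map_some]; split <;> rfl
      rw [hstep]; exact ih _
  exact H l none

theorem max?_natCast_key {α : Type} (l : List α) (g : α → Nat) :
    PySem.List.max? l (fun x => ((g x : Nat) : Int)) = PySem.List.max? l g := by
  unfold PySem.List.max?
  generalize (none : Option α) = acc
  induction l generalizing acc with
  | nil => rfl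
  | cons x t ih =>
    simp only [List.foldl_cons]
    have hstep : (match acc with
        | none => some x
        | some m => if ((g m : Nat) : Int) < ((g x : Nat) : Int) then some x else some m)
        = (match acc with
        | none => some x
        | some m => if g m < g x then some x else some m) := by
      cases acc with
      | none => rfl
      | some m => simp [Nat.cast_lt]
    rw [ih]; congr 1

theorem keys_group (l : List (List Int)) (d : PySem.Dict Int (List (List Int))) :
    (l.foldl (fun d it => d.modify (it.length : Int) [] (fun b => b ++ [it])) d).keys
      = PySem.Set.update d.keys (l.map (fun it => (it.length : Int))) := by
  induction l generalizing d with
  | nil => simp [PySem.Set.update]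
  | cons x t ih =>
    simp only [List.foldl_cons, List.map_cons, PySem.Set.update_cons]
    rw [ih]
    congr 1
    rw [PySem.Dict.keys_modify]
    by_cases h : d.contains (x.length : Int)
    · rw [PySem.Dict.keys_insert_of_contains _ _ h, PySem.Set.add_of_mem
        ((PySem.Dict.contains_iff_mem_keys _ _).mp h)]
    · rw [PySem.Dict.keys_insert_of_not_contains _ _ (by simpa using h), PySem.Set.add_of_not_mem]
      intro hm; exact h ((PySem.Dict.contains_iff_mem_keys _ _).mpr hm)

-- the whole equivalence, stated directly
theorem saecg_main : ∀ (saecg : List (List Int)), Spec_saecg_filter saecg (saecg_filter saecg) := by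
  intro saecg
  unfold Spec_saecg_filter saecg_filter saecg_filter_alt
  by_cases h0 : saecg.isEmpty
  · simp [h0]
  · simp only [h0, Bool.false_eq_true, if_false]
    -- the surviving items, in order
    set F : List (List Int) := saecg.filter (fun it => it != ([0,0,0] : List Int)) with hF
    clear_value F
    -- A's pair loop is the pair of A's two appended lists
    have hfl : saecg.foldl
        (fun (p : List (List Int) × List Int) saecg_item =>
          if saecg_item == [0, 0, 0] then p
          else (p.1 ++ [saecg_item], p.2 ++ [(saecg_item.length : Int)]))
        ([], [])
        = (F, F.map (fun it => (it.length : Int))) := by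
      have hfun : (fun (p : List (List Int) × List Int) saecg_item =>
          if saecg_item == [0, 0, 0] then p
          else (p.1 ++ [saecg_item], p.2 ++ [(saecg_item.length : Int)]))
          = (fun (p : List (List Int) × List Int) saecg_item =>
            (if saecg_item != [0, 0, 0] then p.1 ++ [saecg_item] else p.1,
             if saecg_item != [0, 0, 0] then p.2 ++ [(saecg_item.length : Int)] else p.2)) := by
        funext p x; by_cases hc : x = [0, 0, 0] <;> simp [hc]
      rw [hfun, PySem.List.foldl_prod_mk
          (f := fun acc saecg_item => if saecg_item != [0, 0, 0] then acc ++ [saecg_item] else acc)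
          (g := fun acc saecg_item =>
            if saecg_item != [0, 0, 0] then acc ++ [(saecg_item.length : Int)] else acc)]
      rw [PySem.List.foldl_append_if_eq_filter, PySem.List.foldl_append_if, hF]
      simp
    -- B's grouping loop runs over exactly the surviving items
    have hb : saecg.foldl
        (fun (d : PySem.Dict Int (List (List Int))) item =>
          if item != [0, 0, 0] then d.modify (item.length : Int) [] (fun b => b ++ [item]) else d)
        PySem.Dict.empty
        = F.foldl (fun d it => d.modify (it.length : Int) [] (fun b => b ++ [it])) PySem.Dict.empty := by
      rw [PySem.List.foldl_if_eq_foldl_filter, hF]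
    rw [hfl, hb]
    set D := F.foldl (fun d it => d.modify (it.length : Int) [] (fun b => b ++ [it])) PySem.Dict.empty with hD
    have hkeys : D.keys = PySem.Set.ofList (F.map (fun it => (it.length : Int))) := by
      rw [hD, keys_group]; rfl
    have hget : ∀ k : Int, D.getD k [] = F.filter (fun it => (it.length : Int) == k) := by
      intro k
      have h1 : F.foldl (fun d it => d.modify (it.length : Int) [] (fun b => b ++ [it])) PySem.Dict.empty
          = (F.map (fun it => ((it.length : Int), it))).foldl
              (fun (d : PySem.Dict Int (List (List Int))) p => d.modify p.1 [] (fun b => b ++ [p.2]))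
              PySem.Dict.empty :=
        (List.foldl_map (f := fun it : List Int => ((it.length : Int), it))
          (g := fun (d : PySem.Dict Int (List (List Int))) p => d.modify p.1 [] (fun b => b ++ [p.2]))).symm
      rw [hD, h1, PySem.Dict.getD_foldl_modify_append]
      simp [List.filter_map, Function.comp_def]
    by_cases hFnil : F = []
    · subst hFnil; simp [hkeys]
    · obtain ⟨x, t, hFx⟩ : ∃ x t, F = x :: t := by
        cases F with
        | nil => exact absurd rfl hFnil
        | cons a b => exact ⟨a, b, rfl⟩
      have hFne : F.isEmpty = false := by rw [hFx]; rfl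
      have hKne : D.keys.isEmpty = false := by
        rw [hkeys, hFx, List.map_cons, PySem.Set.ofList_cons]; rfl
      -- the score B maximises is the count A's Counter records
      have hscore : (fun k : Int => ((D.getD k []).length : Int))
          = (fun k : Int => (((F.map (fun it => (it.length : Int))).count k : Nat) : Int)) := by
        funext k
        rw [hget k, List.count_eq_countP, List.countP_map, List.countP_eq_length_filter]
        rfl
      -- A's statistics.mode is B's argmax over the bucket keys
      have hmode : pyMode (F.map (fun it => (it.length : Int)))
          = PySem.List.max? D.keys (fun k => ((D.getD k []).length : Int)) := by
        unfold pyMode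
        rw [PySem.Dict.items_counter, max?_map, Option.map_map, hkeys, hscore,
            max?_natCast_key]
        simp [Function.comp_def]
      obtain ⟨b, hb2⟩ : ∃ b, PySem.List.max? D.keys (fun k => ((D.getD k []).length : Int)) = some b := by
        cases hmx : PySem.List.max? D.keys (fun k => ((D.getD k []).length : Int)) with
        | none =>
          rw [PySem.List.max?_eq_none_iff] at hmx
          rw [hmx] at hKne; simp at hKne
        | some b => exact ⟨b, rfl⟩
      have hmaxD : PySem.List.maxD D.keys (fun k => (D.getD k []).length) 0 = b := by
        unfold PySem.List.maxD
        rw [← max?_natCast_key D.keys (fun k => (D.getD k []).length), hb2]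
        rfl
      -- A's second filtering loop is B's chosen bucket
      have hf2 : F.foldl
          (fun acc saecg_filt_item =>
            if (saecg_filt_item.length : Int) != b then acc else acc ++ [saecg_filt_item]) []
          = D.getD b [] := by
        have hfun2 : (fun (acc : List (List Int)) (saecg_filt_item : List Int) =>
            if (saecg_filt_item.length : Int) != b then acc else acc ++ [saecg_filt_item])
            = (fun acc saecg_filt_item =>
              if (saecg_filt_item.length : Int) == b then acc ++ [saecg_filt_item] else acc) := by
          funext acc y; by_cases hc : ((y.length : Int) = b) <;> simp [hc]
        rw [hfun2, PySem.List.foldl_append_if_eq_filter, hget b]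
        simp
      -- the chosen bucket is nonempty, so A's last guard does not fire
      have hbmem : b ∈ D.keys := PySem.List.max?_mem hb2
      obtain ⟨it0, hit0F, hit0⟩ : ∃ it0, it0 ∈ F ∧ ((it0.length : Int) == b) = true := by
        rw [hkeys] at hbmem
        have hb3 : b ∈ F.map (fun it => (it.length : Int)) := by
          simpa [PySem.Set.mem_ofList] using hbmem
        obtain ⟨it0, hm, he⟩ := List.mem_map.mp hb3
        exact ⟨it0, hm, by simp [he]⟩
      have hne2 : (D.getD b []).isEmpty = false := by
        rw [hget b, List.isEmpty_eq_false_iff]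
        exact List.ne_nil_of_mem (List.mem_filter.mpr ⟨hit0F, hit0⟩)
      rw [hmode, hb2]
      simp only [hFne, Bool.false_eq_true, if_false, hf2, hne2, hmaxD, hKne]

-- ===== VERDICT (by name: the statement is the Claim_ definition above) =====
theorem saecg_filter_spec : Claim_equal_saecg_filter :=
  fun saecg _ => saecg_main saecg
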